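-- pv_equiv track=rewrite | github.com/1id-com/oneid-sdk | oneid/attestation.py | _select_headers_bottom_up_per_dkim
-- ===== SOURCE A (Python) =====
-- from typing import Any, Dict, List, Optional
--
-- def _select_headers_bottom_up_per_dkim(
--   header_names_from_h_tag: List[str],
--   message_headers: List[tuple],
-- ) -> List[Optional[tuple]]:
--   """Select header instances per DKIM RFC 6376 Section 3.7 bottom-up rule.
--
--   For each name in header_names_from_h_tag (left to right), scan
--   message_headers from bottom to top and consume the bottommost unused
--   instance. If no unused instance remains, return None for that slot
--   (absent header -- contributes zero bytes to the hash).
--   """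
--   consumed_indices: set = set()
--   selected: List[Optional[tuple]] = []
--   for requested_name in header_names_from_h_tag:
--     target = requested_name.strip().lower()
--     found_index = -1
--     for i in range(len(message_headers) - 1, -1, -1):
--       if i in consumed_indices:
--         continue
--       if message_headers[i][0].strip().lower() == target:
--         found_index = i
--         break
--     if found_index >= 0:
--       consumed_indices.add(found_index)
--       selected.append(message_headers[found_index])
--     else:
--       selected.append(None)
--   return selected
-- ===== SOURCE B (Python) =====
-- from typing import List, Optional
--
-- def _select_headers_bottom_up_per_dkim(
--   header_names_from_h_tag: List[str],
--   message_headers: List[tuple],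
-- ) -> List[Optional[tuple]]:
--   """Select header instances per DKIM RFC 6376 Section 3.7 bottom-up rule.
--
--   One pass over message_headers builds, per normalized name, a stack of its
--   indices (ascending); each request then pops the bottommost unused instance
--   in O(1) instead of rescanning all headers.
--   """
--   stacks: dict = {}
--   for i in range(len(message_headers)):
--     stacks.setdefault(message_headers[i][0].strip().lower(), []).append(i)
--   selected: List[Optional[tuple]] = []
--   for requested_name in header_names_from_h_tag:
--     stack = stacks.get(requested_name.strip().lower())
--     if stack:
--       selected.append(message_headers[stack.pop()])
--     else:
--       selected.append(None)
--   return selected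
-- ===== Notes on version B (the rewrite author's own statement) =====
-- stated objective: faster
-- what changed: Replaced A's per-request bottom-up rescan over all message headers (with a consumed-index set) by a single pass that groups header indices into per-normalized-name stacks, so each request pops its bottommost unused index in O(1).
import Mathlib
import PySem

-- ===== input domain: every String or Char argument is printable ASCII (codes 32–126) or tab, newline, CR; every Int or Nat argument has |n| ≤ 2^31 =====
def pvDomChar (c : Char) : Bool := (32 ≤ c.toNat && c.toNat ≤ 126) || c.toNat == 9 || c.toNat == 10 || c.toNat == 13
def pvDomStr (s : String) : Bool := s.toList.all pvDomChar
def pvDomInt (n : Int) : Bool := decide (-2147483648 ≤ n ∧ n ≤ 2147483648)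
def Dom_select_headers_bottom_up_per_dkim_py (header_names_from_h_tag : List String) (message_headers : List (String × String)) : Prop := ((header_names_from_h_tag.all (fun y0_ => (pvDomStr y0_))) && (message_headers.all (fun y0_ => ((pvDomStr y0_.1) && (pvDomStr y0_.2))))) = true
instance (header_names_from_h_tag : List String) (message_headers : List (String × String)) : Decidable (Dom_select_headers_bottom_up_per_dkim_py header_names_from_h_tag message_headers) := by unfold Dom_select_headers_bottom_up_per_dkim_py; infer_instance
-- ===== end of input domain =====

-- B replaces A's per-request bottom-up rescan of all headers by a single pass building
-- per-name index stacks that are popped per request (objective: faster, one pass + O(1) pops).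

-- ===== PORT A =====
-- name.strip().lower()
def pvNorm (s : String) : String := PySem.Str.lower (PySem.Str.strip s)
-- message_headers[i][0].strip().lower()  (i is always in range where this is used)
def pvKey (message_headers : List (String × String)) (i : Nat) : String :=
  pvNorm (message_headers.getD i ("", "")).1

-- the inner 'for i in range(len(message_headers) - 1, -1, -1)' loop with its break,
-- as a structural countdown: argument k+1 means "next index to test is k"
def pvScanA (message_headers : List (String × String)) (consumed : PySem.Set Nat)
    (target : String) : Nat → Int
  | 0 => -1
  | k+1 =>
    if PySem.Set.contains consumed k then pvScanA message_headers consumed target k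
    else if pvKey message_headers k == target then (k : Int)
    else pvScanA message_headers consumed target k

-- one iteration of A's outer loop: state = (consumed_indices, selected)
def pvStepA (message_headers : List (String × String))
    (st : PySem.Set Nat × List (Option (String × String))) (requested_name : String) :
    PySem.Set Nat × List (Option (String × String)) :=
  let target := pvNorm requested_name
  let found_index := pvScanA message_headers st.1 target message_headers.length
  if found_index ≥ 0 then
    (PySem.Set.add st.1 found_index.toNat,
     st.2 ++ [some (message_headers.getD found_index.toNat ("", ""))])
  else
    (st.1, st.2 ++ [none])

def select_headers_bottom_up_per_dkim_py (header_names_from_h_tag : List String)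
    (message_headers : List (String × String)) : List (Option (String × String)) :=
  (header_names_from_h_tag.foldl (pvStepA message_headers) (PySem.Set.empty, [])).2

-- ===== PORT B =====
-- 'stacks.setdefault(message_headers[i][0].strip().lower(), []).append(i)' over all i
def pvBuild (message_headers : List (String × String)) : PySem.Dict String (List Nat) :=
  (List.range message_headers.length).foldl
    (fun d i => d.modify (pvKey message_headers i) [] (· ++ [i]))
    PySem.Dict.empty

-- one iteration of B's request loop: state = (stacks, selected);
-- 'stack.pop()' on the mutable list = re-insert the stack minus its last element
def pvStepB (message_headers : List (String × String))
    (st : PySem.Dict String (List Nat) × List (Option (String × String)))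
    (requested_name : String) :
    PySem.Dict String (List Nat) × List (Option (String × String)) :=
  let stack := st.1.getD (pvNorm requested_name) []
  match stack.getLast? with
  | some i =>
      (st.1.insert (pvNorm requested_name) stack.dropLast,
       st.2 ++ [some (message_headers.getD i ("", ""))])
  | none => (st.1, st.2 ++ [none])

def select_headers_bottom_up_per_dkim_py_alt (header_names_from_h_tag : List String)
    (message_headers : List (String × String)) : List (Option (String × String)) :=
  (header_names_from_h_tag.foldl (pvStepB message_headers) (pvBuild message_headers, [])).2

-- ===== PRECONDITION & SPEC =====
def Spec_select_headers_bottom_up_per_dkim_py (header_names_from_h_tag : List String) (message_headers : List (String × String)) (out : List (Option (String × String))) : Prop := out = select_headers_bottom_up_per_dkim_py_alt header_names_from_h_tag message_headers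
instance (header_names_from_h_tag : List String) (message_headers : List (String × String)) (out : List (Option (String × String))) : Decidable (Spec_select_headers_bottom_up_per_dkim_py header_names_from_h_tag message_headers out) := by unfold Spec_select_headers_bottom_up_per_dkim_py; infer_instance

-- ===== CLAIM (what is proved, stated in full; the proofs are below) =====
def Claim_equal_select_headers_bottom_up_per_dkim_py : Prop := ∀ (header_names_from_h_tag : List String) (message_headers : List (String × String)), Dom_select_headers_bottom_up_per_dkim_py header_names_from_h_tag message_headers → Spec_select_headers_bottom_up_per_dkim_py header_names_from_h_tag message_headers (select_headers_bottom_up_per_dkim_py header_names_from_h_tag message_headers)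

-- ===== LEMMAS AND PROOFS =====

-- the unconsumed indices whose normalized header name is t, in ascending order
def pvRem (message_headers : List (String × String)) (consumed : List Nat) (t : String) : List Nat :=
  (List.range message_headers.length).filter
    (fun i => (pvKey message_headers i == t) && !decide (i ∈ consumed))

theorem pvScanA_eq (message_headers : List (String × String)) (c : PySem.Set Nat)
    (t : String) : ∀ k : Nat,
    pvScanA message_headers c t k =
      (match ((List.range k).filter
          (fun i => (pvKey message_headers i == t) && !decide (i ∈ c))).getLast? with
       | some i => (i : Int)
       | none => -1) := by
  intro k
  induction k with
  | zero => simp [pvScanA]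
  | succ k ih =>
    rw [List.range_succ, List.filter_append]
    by_cases hc : k ∈ c
    · have hcc : PySem.Set.contains c k = true := by simp [PySem.Set.contains, hc]
      simp [pvScanA, hc, ih]
    · have hcc : PySem.Set.contains c k = false := by simp [PySem.Set.contains, hc]
      by_cases hb : pvKey message_headers k == t
      · simp [pvScanA, hc, hb]
      · simp [pvScanA, hc, hb, ih]

theorem pvBuild_eq (message_headers : List (String × String)) (t : String) :
    (pvBuild message_headers).getD t [] = pvRem message_headers [] t := by
  have h1 : pvBuild message_headers =
      ((List.range message_headers.length).map (fun i => (pvKey message_headers i, i))).foldl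
        (fun d p => d.modify p.1 [] (· ++ [p.2])) PySem.Dict.empty := by
    rw [List.foldl_map]; rfl
  rw [h1, PySem.Dict.getD_foldl_modify_append]
  simp [pvRem, List.filter_map, List.map_map, Function.comp_def]

-- removing the popped index from every stack: the target stack loses its last element,
-- the others are unchanged
theorem pvRem_step (message_headers : List (String × String)) (c : List Nat) (t : String)
    (i : Nat) (h : (pvRem message_headers c t).getLast? = some i) (t' : String) :
    pvRem message_headers (PySem.Set.add c i) t' =
      if t' = t then (pvRem message_headers c t).dropLast else pvRem message_headers c t' := by
  have hi : i ∈ pvRem message_headers c t := List.mem_of_getLast? h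
  have hi' := List.mem_filter.mp hi
  have hkey : pvKey message_headers i = t := by
    have := hi'.2
    simp at this
    exact this.1
  by_cases ht : t' = t
  · subst ht
    have hnd : (pvRem message_headers c t').Nodup :=
      List.Nodup.filter _ List.nodup_range
    have h2 : pvRem message_headers (PySem.Set.add c i) t' =
        (pvRem message_headers c t').filter (fun j => !decide (j = i)) := by
      simp only [pvRem, List.filter_filter]
      apply List.filter_congr
      intro j _
      by_cases hjc : j ∈ c <;> by_cases hji : j = i <;>
        simp [PySem.Set.mem_add, hjc, hji]
    rw [h2, if_pos rfl]
    have hl : pvRem message_headers c t' =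
        (pvRem message_headers c t').dropLast ++ [i] :=
      (List.dropLast_append_getLast? i h).symm
    have hnotmem : i ∉ (pvRem message_headers c t').dropLast := by
      have := hl ▸ hnd
      have := List.disjoint_of_nodup_append this
      intro hmem
      exact this hmem (by simp)
    conv_lhs => rw [hl]
    rw [List.filter_append]
    have h3 : ((pvRem message_headers c t').dropLast).filter (fun j => !decide (j = i)) =
        (pvRem message_headers c t').dropLast := by
      apply List.filter_eq_self.mpr
      intro a ha
      simp
      intro hai
      exact hnotmem (hai ▸ ha)
    simp [h3]
  · rw [if_neg ht]
    simp only [pvRem]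
    apply List.filter_congr
    intro j _
    by_cases hb : pvKey message_headers j == t'
    · have hj : pvKey message_headers j = t' := by simpa using hb
      have hji : j ≠ i := by
        intro hji
        exact ht ((hji ▸ hj).symm.trans hkey)
      simp [PySem.Set.mem_add, hb, hji]
    · simp [hb]

theorem pvMain (message_headers : List (String × String)) :
    ∀ (names : List String) (c : PySem.Set Nat) (d : PySem.Dict String (List Nat))
      (acc : List (Option (String × String))),
      (∀ t, d.getD t [] = pvRem message_headers c t) →
      (names.foldl (pvStepA message_headers) (c, acc)).2 =
        (names.foldl (pvStepB message_headers) (d, acc)).2 := by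
  intro names
  induction names with
  | nil => intro c d acc _; rfl
  | cons name rest ih =>
    intro c d acc hinv
    simp only [List.foldl_cons]
    have hscan : pvScanA message_headers c (pvNorm name) message_headers.length =
        (match (pvRem message_headers c (pvNorm name)).getLast? with
         | some i => (i : Int)
         | none => -1) :=
      pvScanA_eq message_headers c (pvNorm name) message_headers.length
    have hstack : d.getD (pvNorm name) [] = pvRem message_headers c (pvNorm name) :=
      hinv (pvNorm name)
    cases hlast : (pvRem message_headers c (pvNorm name)).getLast? with
    | none =>
      have hA : pvStepA message_headers (c, acc) name = (c, acc ++ [none]) := by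
        simp only [pvStepA]
        rw [hscan, hlast]
        simp
      have hB : pvStepB message_headers (d, acc) name = (d, acc ++ [none]) := by
        simp only [pvStepB, hstack, hlast]
      rw [hA, hB]
      exact ih c d (acc ++ [none]) hinv
    | some i =>
      have hA : pvStepA message_headers (c, acc) name =
          (PySem.Set.add c i, acc ++ [some (message_headers.getD i ("", ""))]) := by
        simp only [pvStepA]
        rw [hscan, hlast]
        simp
      have hB : pvStepB message_headers (d, acc) name =
          (d.insert (pvNorm name) (pvRem message_headers c (pvNorm name)).dropLast,
           acc ++ [some (message_headers.getD i ("", ""))]) := by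
        simp only [pvStepB, hstack, hlast]
      rw [hA, hB]
      apply ih
      intro t'
      rw [PySem.Dict.getD_insert, pvRem_step message_headers c (pvNorm name) i hlast t']
      split_ifs with h
      · rfl
      · exact hinv t'

-- ===== VERDICT (by name: the statement is the Claim_ definition above) =====
theorem select_headers_bottom_up_per_dkim_py_spec : Claim_equal_select_headers_bottom_up_per_dkim_py := by
  intro names headers _
  unfold Spec_select_headers_bottom_up_per_dkim_py
  unfold select_headers_bottom_up_per_dkim_py select_headers_bottom_up_per_dkim_py_alt
  exact pvMain headers names PySem.Set.empty (pvBuild headers) []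
    (fun t => pvBuild_eq headers t)
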